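-- pv_equiv track=rewrite | github.com/jf-2020/code-wars | eureka numbers/eureka_numbers.py | sum_dig_power
-- ===== SOURCE A (Python) =====
-- def sum_dig_power(a,b):
-- 	'''
-- 		Inputs:
-- 			a: Integer
-- 			b: Integer
-- 		Output:
-- 			res: List
-- 	'''
-- 	res = list()
-- 	for num in range(a, b+1):
-- 		# first, pick off the digits
-- 		curr_num, digits = num, list()
-- 		while curr_num > 0:
-- 			digits.append(curr_num%10)
-- 			curr_num = curr_num//10
-- 		digits.reverse()
--
-- 		# second, get the relevant sum of powered digits
-- 		dig_sum = 0
-- 		for idx, digit in enumerate(digits):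
-- 			dig_sum += digit**(idx+1)
--
-- 		# lastly, add to the list if it's equal to the original int in question
-- 		if dig_sum == num:
-- 			res.append(num)
--
-- 	return res
-- ===== SOURCE B (Python) =====
-- def sum_dig_power(a, b):
--     res = []
--     for num in range(max(a, 0), b + 1):
--         # count the digits of num
--         d, n = 0, num
--         while n > 0:
--             d += 1
--             n //= 10
--         # sum digit powers least-significant first, exponent counting DOWN from d
--         s, n, k = 0, num, d
--         while n > 0:
--             s += (n % 10) ** k
--             k -= 1
--             n //= 10
--         if s == num:
--             res.append(num)
--     return res
-- ===== Notes on version B (the rewrite author's own statement) =====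
-- stated objective: alternative
-- what changed: B drops A's digit list + reverse + enumerate entirely: it clips the range at 0 (negatives can never equal a digit-power sum), counts the digits in one arithmetic pass, then sums digit powers least-significant-first with the exponent counting down, using no data structure at all.
import Mathlib
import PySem

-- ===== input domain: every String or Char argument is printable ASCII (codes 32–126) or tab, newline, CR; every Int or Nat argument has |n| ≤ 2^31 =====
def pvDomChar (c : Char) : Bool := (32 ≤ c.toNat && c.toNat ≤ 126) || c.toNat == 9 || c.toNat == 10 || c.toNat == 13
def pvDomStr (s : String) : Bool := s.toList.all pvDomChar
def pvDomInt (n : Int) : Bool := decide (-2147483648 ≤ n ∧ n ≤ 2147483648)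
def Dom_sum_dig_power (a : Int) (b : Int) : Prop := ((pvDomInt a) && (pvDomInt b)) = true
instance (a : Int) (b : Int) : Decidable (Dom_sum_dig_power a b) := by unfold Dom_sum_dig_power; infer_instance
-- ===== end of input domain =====

-- B replaces A's digit list + reverse + enumerate by two plain arithmetic passes
-- (digit count, then digit powers with a descending exponent) over range(max(a,0), b+1);
-- objective: alternative structure, same asymptotic cost.

-- ===== PORT A =====
-- A's inner while loop: while curr_num > 0: digits.append(curr_num % 10); curr_num //= 10
def pvDigsA (curr : Int) (digits : List Int) : List Int :=
  if h : 0 < curr then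
    pvDigsA (PySem.Int.floordiv curr 10) (digits ++ [PySem.Int.mod curr 10])
  else digits
termination_by curr.toNat
decreasing_by
  rw [PySem.Int.floordiv_eq_ediv_of_pos (by norm_num : (0:Int) < 10)]
  have h1 := Int.ediv_add_emod curr 10
  have h2 := Int.emod_nonneg curr (by norm_num : (10:Int) ≠ 0)
  have h3 := Int.emod_lt_of_pos curr (by norm_num : (0:Int) < 10)
  omega

-- A's dig_sum loop: for idx, digit in enumerate(digits): dig_sum += digit ** (idx + 1)
def pvDigSumA (digits : List Int) : Int :=
  (PySem.List.enumerate digits 0).foldl (fun s p => s + p.2 ^ (p.1 + 1).toNat) 0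

def sum_dig_power (a : Int) (b : Int) : List Int :=
  (PySem.List.pyRange a (b + 1) 1).foldl
    (fun res num =>
      if pvDigSumA (pvDigsA num []).reverse == num then res ++ [num] else res) []

-- ===== PORT B =====
-- B's first loop: while n > 0: d += 1; n //= 10
def pvCountB (n : Int) (d : Int) : Int :=
  if h : 0 < n then pvCountB (PySem.Int.floordiv n 10) (d + 1) else d
termination_by n.toNat
decreasing_by
  rw [PySem.Int.floordiv_eq_ediv_of_pos (by norm_num : (0:Int) < 10)]
  have h1 := Int.ediv_add_emod n 10
  have h2 := Int.emod_nonneg n (by norm_num : (10:Int) ≠ 0)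
  have h3 := Int.emod_lt_of_pos n (by norm_num : (0:Int) < 10)
  omega

-- B's second loop: while n > 0: s += (n % 10) ** k; k -= 1; n //= 10
def pvSumB (n : Int) (k : Int) (s : Int) : Int :=
  if h : 0 < n then
    pvSumB (PySem.Int.floordiv n 10) (k - 1) (s + (PySem.Int.mod n 10) ^ k.toNat)
  else s
termination_by n.toNat
decreasing_by
  rw [PySem.Int.floordiv_eq_ediv_of_pos (by norm_num : (0:Int) < 10)]
  have h1 := Int.ediv_add_emod n 10
  have h2 := Int.emod_nonneg n (by norm_num : (10:Int) ≠ 0)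
  have h3 := Int.emod_lt_of_pos n (by norm_num : (0:Int) < 10)
  omega

def sum_dig_power_alt (a : Int) (b : Int) : List Int :=
  (PySem.List.pyRange (max a 0) (b + 1) 1).foldl
    (fun res num =>
      if pvSumB num (pvCountB num 0) 0 == num then res ++ [num] else res) []

-- ===== PRECONDITION & SPEC =====
def Spec_sum_dig_power (a : Int) (b : Int) (out : List Int) : Prop := out = sum_dig_power_alt a b
instance (a : Int) (b : Int) (out : List Int) : Decidable (Spec_sum_dig_power a b out) := by unfold Spec_sum_dig_power; infer_instance

-- ===== CLAIM (what is proved, stated in full; the proofs are below) =====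
def Claim_equal_sum_dig_power : Prop := ∀ (a : Int) (b : Int), Dom_sum_dig_power a b → Spec_sum_dig_power a b (sum_dig_power a b)

-- ===== LEMMAS AND PROOFS =====

-- mathematical helpers used only by the proofs
def pvSumExp (l : List Int) (k : Int) : Int :=
  match l with
  | [] => 0
  | x :: xs => x ^ k.toNat + pvSumExp xs (k - 1)

def pvESum (l : List Int) (j : Int) : Int :=
  match l with
  | [] => 0
  | x :: xs => x ^ (j + 1).toNat + pvESum xs (j + 1)

theorem pvDigsA_acc (c : Int) (acc : List Int) :
    pvDigsA c acc = acc ++ pvDigsA c [] := by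
  by_cases h : 0 < c
  · conv_lhs => rw [pvDigsA]
    conv_rhs => rw [pvDigsA]
    simp only [h, dif_pos]
    rw [pvDigsA_acc (PySem.Int.floordiv c 10) (acc ++ [PySem.Int.mod c 10]),
        pvDigsA_acc (PySem.Int.floordiv c 10) ([] ++ [PySem.Int.mod c 10])]
    simp
  · conv_lhs => rw [pvDigsA]
    conv_rhs => rw [pvDigsA]
    simp [h]
termination_by c.toNat
decreasing_by
  all_goals
    rw [PySem.Int.floordiv_eq_ediv_of_pos (by norm_num : (0:Int) < 10)]
    have h1 := Int.ediv_add_emod c 10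
    have h2 := Int.emod_nonneg c (by norm_num : (10:Int) ≠ 0)
    have h3 := Int.emod_lt_of_pos c (by norm_num : (0:Int) < 10)
    omega

theorem pvDigsA_cons (c : Int) (h : 0 < c) :
    pvDigsA c [] = PySem.Int.mod c 10 :: pvDigsA (PySem.Int.floordiv c 10) [] := by
  rw [pvDigsA]
  simp only [h, dif_pos, List.nil_append]
  exact pvDigsA_acc _ _

theorem pvDigsA_nil (c : Int) (h : ¬ 0 < c) : pvDigsA c [] = [] := by
  rw [pvDigsA]; simp [h]

theorem pvCountB_eq (c : Int) (d : Int) :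
    pvCountB c d = d + ((pvDigsA c []).length : Int) := by
  by_cases h : 0 < c
  · rw [pvCountB]
    simp only [h, dif_pos]
    rw [pvCountB_eq (PySem.Int.floordiv c 10) (d + 1), pvDigsA_cons c h]
    simp only [List.length_cons]
    push_cast
    ring
  · rw [pvCountB]
    simp [h, pvDigsA_nil c h]
termination_by c.toNat
decreasing_by
  rw [PySem.Int.floordiv_eq_ediv_of_pos (by norm_num : (0:Int) < 10)]
  have h1 := Int.ediv_add_emod c 10
  have h2 := Int.emod_nonneg c (by norm_num : (10:Int) ≠ 0)
  have h3 := Int.emod_lt_of_pos c (by norm_num : (0:Int) < 10)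
  omega

theorem pvSumB_eq (c : Int) (k s : Int) :
    pvSumB c k s = s + pvSumExp (pvDigsA c []) k := by
  by_cases h : 0 < c
  · rw [pvSumB]
    simp only [h, dif_pos]
    rw [pvSumB_eq (PySem.Int.floordiv c 10) (k - 1) _, pvDigsA_cons c h]
    simp only [pvSumExp]
    omega
  · rw [pvSumB]
    simp [h, pvDigsA_nil c h, pvSumExp]
termination_by c.toNat
decreasing_by
  rw [PySem.Int.floordiv_eq_ediv_of_pos (by norm_num : (0:Int) < 10)]
  have h1 := Int.ediv_add_emod c 10
  have h2 := Int.emod_nonneg c (by norm_num : (10:Int) ≠ 0)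
  have h3 := Int.emod_lt_of_pos c (by norm_num : (0:Int) < 10)
  omega

theorem pvESum_foldl (l : List Int) : ∀ (j s : Int),
    (PySem.List.enumerate l j).foldl (fun s p => s + p.2 ^ (p.1 + 1).toNat) s
      = s + pvESum l j := by
  induction l with
  | nil => intro j s; simp [PySem.List.enumerate, pvESum]
  | cons x xs ih =>
      intro j s
      rw [PySem.List.enumerate_cons]
      simp only [List.foldl_cons]
      rw [ih (j + 1)]
      simp [pvESum]
      ring

theorem pvESum_append (l : List Int) : ∀ (j : Int) (x : Int),
    pvESum (l ++ [x]) j = pvESum l j + x ^ (j + l.length + 1).toNat := by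
  induction l with
  | nil => intro j x; simp [pvESum]
  | cons y ys ih =>
      intro j x
      simp only [List.cons_append, pvESum]
      rw [ih (j + 1)]
      have harg : j + 1 + (ys.length : Int) + 1 = j + ((y :: ys).length : Int) + 1 := by
        simp only [List.length_cons]; push_cast; ring
      rw [harg]
      ring

theorem pvESum_reverse (l : List Int) :
    pvESum l.reverse 0 = pvSumExp l (l.length : Int) := by
  induction l with
  | nil => simp [pvESum, pvSumExp]
  | cons x xs ih =>
      rw [List.reverse_cons, pvESum_append, ih]
      simp only [pvSumExp]
      have h1 : ((x :: xs).length : Int).toNat = (0 + (xs.reverse.length : Int) + 1).toNat := by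
        simp
      have h2 : ((x :: xs).length : Int) - 1 = (xs.length : Int) := by
        simp only [List.length_cons]; push_cast; ring
      rw [h1, h2]
      ring

theorem pvCond_eq (num : Int) :
    pvDigSumA (pvDigsA num []).reverse = pvSumB num (pvCountB num 0) 0 := by
  rw [pvSumB_eq, pvCountB_eq]
  unfold pvDigSumA
  rw [pvESum_foldl, pvESum_reverse]
  simp

theorem pvCond_neg (num : Int) (h : num < 0) :
    (pvDigSumA (pvDigsA num []).reverse == num) = false := by
  rw [pvDigsA_nil num (by omega)]
  simp [pvDigSumA]
  omega

theorem pvA_filter (a b : Int) :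
    sum_dig_power a b
      = (PySem.List.pyRange a (b + 1) 1).filter
          (fun num => pvDigSumA (pvDigsA num []).reverse == num) := by
  unfold sum_dig_power
  rw [PySem.List.foldl_append_if
        (fun num => pvDigSumA (pvDigsA num []).reverse == num) (fun x => x)]
  simp

theorem pvB_filter (a b : Int) :
    sum_dig_power_alt a b
      = (PySem.List.pyRange (max a 0) (b + 1) 1).filter
          (fun num => pvSumB num (pvCountB num 0) 0 == num) := by
  unfold sum_dig_power_alt
  rw [PySem.List.foldl_append_if
        (fun num => pvSumB num (pvCountB num 0) 0 == num) (fun x => x)]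
  simp

theorem pvRange_clip (a b : Int) :
    (PySem.List.pyRange a (b + 1) 1).filter
        (fun num => pvDigSumA (pvDigsA num []).reverse == num)
      = (PySem.List.pyRange (max a 0) (b + 1) 1).filter
          (fun num => pvDigSumA (pvDigsA num []).reverse == num) := by
  by_cases ha : 0 ≤ a
  · rw [max_eq_left (by omega)]
  · rw [max_eq_right (by omega)]
    by_cases hb : 0 ≤ b + 1
    · rw [PySem.List.pyRange_one_append a 0 (b + 1) (by omega) hb, List.filter_append]
      have : (PySem.List.pyRange a 0 1).filter
          (fun num => pvDigSumA (pvDigsA num []).reverse == num) = [] := by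
        rw [List.filter_eq_nil_iff]
        intro x hx
        have hx' := PySem.List.mem_pyRange_one.mp hx
        simp only [pvCond_neg x (by omega), Bool.false_eq_true, not_false_eq_true]
      rw [this, List.nil_append]
    · rw [PySem.List.pyRange_one_eq_nil (a := 0) (by omega), List.filter_nil,
          List.filter_eq_nil_iff]
      intro x hx
      have hx' := PySem.List.mem_pyRange_one.mp hx
      simp only [pvCond_neg x (by omega), Bool.false_eq_true, not_false_eq_true]

-- ===== VERDICT (by name: the statement is the Claim_ definition above) =====
theorem sum_dig_power_spec : Claim_equal_sum_dig_power := by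
  intro a b _
  unfold Spec_sum_dig_power
  rw [pvA_filter, pvB_filter, pvRange_clip]
  apply List.filter_congr
  intro x _
  rw [pvCond_eq]
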